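-- pv_equiv track=rewrite | github.com/ashishkadali/Competatice-programing | 07-isfactor-Python/isfactor.py | fun_isfactor
-- ===== SOURCE A (Python) =====
-- def fun_isfactor(f, n):
-- 	if n==0:
-- 		return True
-- 	if n!=0:
-- 		l=[]
-- 		for i in range(1,n+1):
-- 			if n%i==0:
-- 				l.append(i)
-- 		if abs(f) in l:
-- 			return True
-- 		else:
-- 			return False
-- ===== SOURCE B (Python) =====
-- def fun_isfactor(f, n):
--     return n == 0 or (n > 0 and f != 0 and n % abs(f) == 0)
-- ===== Notes on version B (the rewrite author's own statement) =====
-- stated objective: faster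
-- what changed: Replaces the O(n) loop that builds the full divisor list of n with a closed-form arithmetic test: n == 0, or n > 0 and abs(f) is a positive divisor of n (a single modulo).
import Mathlib
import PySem

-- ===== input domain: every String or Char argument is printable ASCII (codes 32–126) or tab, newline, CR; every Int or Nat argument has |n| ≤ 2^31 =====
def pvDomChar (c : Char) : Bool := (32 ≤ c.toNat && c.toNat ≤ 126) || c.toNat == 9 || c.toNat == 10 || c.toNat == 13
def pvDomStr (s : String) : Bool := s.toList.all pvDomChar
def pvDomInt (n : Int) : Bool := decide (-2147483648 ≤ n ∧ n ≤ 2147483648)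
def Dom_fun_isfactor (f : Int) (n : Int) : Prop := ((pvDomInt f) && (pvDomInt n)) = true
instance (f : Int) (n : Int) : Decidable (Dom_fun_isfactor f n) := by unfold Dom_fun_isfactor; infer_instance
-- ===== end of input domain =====

-- B replaces A's O(n) divisor-list loop with a single closed-form divisibility test (same return value).
-- ===== PORT A =====
def fun_isfactor (f : Int) (n : Int) : Bool :=
  if n == 0 then true
  else
    -- l=[]; for i in range(1,n+1): if n%i==0: l.append(i)
    let l : List Int := (PySem.List.pyRange 1 (n+1) 1).foldl
      (fun acc i => if PySem.Int.mod n i == 0 then acc ++ [i] else acc) []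
    if l.contains |f| then true else false

-- ===== PORT B =====
def fun_isfactor_alt (f : Int) (n : Int) : Bool :=
  n == 0 || (decide (0 < n) && (f != 0) && (PySem.Int.mod n |f| == 0))

-- ===== PRECONDITION & SPEC =====
def Spec_fun_isfactor (f : Int) (n : Int) (out : Bool) : Prop := out = fun_isfactor_alt f n
instance (f : Int) (n : Int) (out : Bool) : Decidable (Spec_fun_isfactor f n out) := by unfold Spec_fun_isfactor; infer_instance

-- ===== CLAIM (what is proved, stated in full; the proofs are below) =====
def Claim_equal_fun_isfactor : Prop := ∀ (f : Int) (n : Int), Dom_fun_isfactor f n → Spec_fun_isfactor f n (fun_isfactor f n)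

-- ===== LEMMAS AND PROOFS =====
theorem fun_isfactor_eq_alt (f n : Int) : fun_isfactor f n = fun_isfactor_alt f n := by
  unfold fun_isfactor fun_isfactor_alt
  by_cases h0 : n = 0
  · simp [h0]
  · rcases lt_or_gt_of_ne h0 with hneg | hpos
    · -- n < 0: the range is empty, so A's list is empty and A returns false; B's 0 < n test fails
      rw [PySem.List.pyRange_one_eq_nil (by omega)]
      simp [h0, not_lt.mpr (le_of_lt hneg)]
    · -- n > 0
      rw [PySem.List.foldl_append_if_eq_filter]
      have hiff : |f| ∈ (PySem.List.pyRange 1 (n+1) 1).filter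
          (fun i => PySem.Int.mod n i == 0) ↔ (f ≠ 0 ∧ PySem.Int.mod n |f| = 0) := by
        simp only [List.mem_filter, PySem.List.mem_pyRange_one, beq_iff_eq, decide_eq_true_eq]
        constructor
        · rintro ⟨⟨h1, _⟩, hm⟩
          refine ⟨fun hf0 => ?_, hm⟩
          rw [hf0] at h1; simp at h1
        · rintro ⟨hf, hm⟩
          have habs : 1 ≤ |f| := by
            rcases lt_or_gt_of_ne hf with h | h
            · rw [abs_of_neg h]; omega
            · rw [abs_of_pos h]; omega
          have hle : |f| ≤ n := Int.le_of_dvd hpos ((PySem.Int.mod_eq_zero_iff_dvd n |f|).mp hm)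
          exact ⟨⟨habs, by omega⟩, hm⟩
      simp only [beq_iff_eq, if_neg h0, List.nil_append]
      by_cases hmem : f ≠ 0 ∧ PySem.Int.mod n |f| = 0
      · have hc : (((PySem.List.pyRange 1 (n+1) 1).filter
            (fun i => PySem.Int.mod n i == 0)).contains |f|) = true := by
          simp only [List.contains_eq_mem, decide_eq_true_eq]
          exact hiff.mpr hmem
        simp only [hc, show (PySem.Int.mod n |f| == 0) = true from beq_iff_eq.mpr hmem.2]
        simp [hpos, hmem.1, h0]
      · have hc : (((PySem.List.pyRange 1 (n+1) 1).filter
            (fun i => PySem.Int.mod n i == 0)).contains |f|) = false := by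
          simp only [List.contains_eq_mem, decide_eq_false_iff_not]
          exact fun h => hmem (hiff.mp h)
        simp only [hc]
        by_cases hf : f = 0
        · simp [hf, h0]
        · have hm : PySem.Int.mod n |f| ≠ 0 := fun hm => hmem ⟨hf, hm⟩
          rw [show (PySem.Int.mod n |f| == 0) = false from beq_eq_false_iff_ne.mpr hm]
          simp [h0]

-- ===== VERDICT (by name: the statement is the Claim_ definition above) =====
theorem fun_isfactor_spec : Claim_equal_fun_isfactor := by
  intro f n _
  exact fun_isfactor_eq_alt f n
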